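-- pv_equiv track=rewrite | github.com/web3-claw/MetaClaw | metaclaw/api_server.py | _synergy_tokenize
-- ===== SOURCE A (Python) =====
-- def _synergy_tokenize(text: str) -> set[str]:
--     """Lightweight tokenizer for Jaccard overlap computation."""
--     tokens: list[str] = []
--     buf: list[str] = []
--     for ch in text.lower():
--         if ch.isalnum() or ch in {"_", "-"}:
--             buf.append(ch)
--         elif buf:
--             tok = "".join(buf)
--             if len(tok) >= 2:
--                 tokens.append(tok)
--             buf = []
--     if buf:
--         tok = "".join(buf)
--         if len(tok) >= 2:
--             tokens.append(tok)
--     return set(tokens)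
-- ===== SOURCE B (Python) =====
-- def _synergy_tokenize(text: str) -> set[str]:
--     """Run-scanning tokenizer: jump over maximal alnum/_/- runs and slice them out."""
--     s = text.lower()
--     n = len(s)
--     out: set[str] = set()
--     i = 0
--     while i < n:
--         if s[i].isalnum() or s[i] in "_-":
--             j = i
--             while j < n and (s[j].isalnum() or s[j] in "_-"):
--                 j += 1
--             if j - i >= 2:
--                 out.add(s[i:j])
--             i = j
--         else:
--             i += 1
--     return out
-- ===== Notes on version B (the rewrite author's own statement) =====
-- stated objective: alternative
-- what changed: Replaced A's per-character buffer accumulation with its separate trailing-flush branch by a run-scanning pass that jumps over each maximal alnum/_/- run with an inner index scan and slices the token out, so no buffer and no final flush exist.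
import Mathlib
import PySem

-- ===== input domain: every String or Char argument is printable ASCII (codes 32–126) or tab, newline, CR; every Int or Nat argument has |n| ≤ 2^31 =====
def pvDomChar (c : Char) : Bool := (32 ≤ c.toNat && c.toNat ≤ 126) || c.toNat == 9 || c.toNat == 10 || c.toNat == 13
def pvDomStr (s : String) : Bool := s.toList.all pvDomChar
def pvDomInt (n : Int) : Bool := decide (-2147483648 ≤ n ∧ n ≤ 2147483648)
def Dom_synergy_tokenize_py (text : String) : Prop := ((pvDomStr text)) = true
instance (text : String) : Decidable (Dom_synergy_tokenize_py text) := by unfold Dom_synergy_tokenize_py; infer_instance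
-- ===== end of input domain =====

-- B replaces A's per-character buffer accumulation (with its separate trailing flush) by a
-- run-scanning pass that jumps over each maximal alnum/_/- run and slices it out: alternative decomposition, same result.

-- ===== PORT A =====
-- token character predicate: ch.isalnum() or ch in {"_", "-"}
def pvTokChar (c : Char) : Bool := PySem.Chars.isalnum c || c == '_' || c == '-'

-- one iteration of A's for-loop over (tokens, buf)
def pvStepA (st : List String × List Char) (ch : Char) : List String × List Char :=
  if pvTokChar ch then (st.1, st.2 ++ [ch])
  else if st.2 ≠ [] then
    let tok := String.ofList st.2   -- "".join(buf)
    (if 2 ≤ PySem.Str.len tok then st.1 ++ [tok] else st.1, [])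
  else st

def synergy_tokenize_py (text : String) : List String :=
  let st := (PySem.Str.lower text).toList.foldl pvStepA ([], [])
  let tokens :=
    if st.2 ≠ [] then
      let tok := String.ofList st.2
      if 2 ≤ PySem.Str.len tok then st.1 ++ [tok] else st.1
    else st.1
  PySem.Set.ofList tokens

-- ===== PORT B =====
-- B's outer while-loop: at a token character take the whole maximal run (inner while
-- 'j += 1' = takeWhile/dropWhile), add the slice if its length is ≥ 2, resume after it.
def pvScanB (cs : List Char) (out : PySem.Set String) : PySem.Set String :=
  match cs with
  | [] => out
  | c :: rest =>
    if pvTokChar c then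
      let run := c :: rest.takeWhile pvTokChar
      let rest' := rest.dropWhile pvTokChar
      pvScanB rest' (if 2 ≤ run.length then PySem.Set.add out (String.ofList run) else out)
    else pvScanB rest out
termination_by cs.length
decreasing_by
  · exact Nat.lt_succ_of_le (List.length_dropWhile_le _ _)
  · simp

def synergy_tokenize_py_alt (text : String) : List String :=
  pvScanB (PySem.Str.lower text).toList PySem.Set.empty

-- ===== PRECONDITION & SPEC =====
def Spec_synergy_tokenize_py (text : String) (out : List String) : Prop := out = synergy_tokenize_py_alt text
instance (text : String) (out : List String) : Decidable (Spec_synergy_tokenize_py text out) := by unfold Spec_synergy_tokenize_py; infer_instance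

-- ===== CLAIM (what is proved, stated in full; the proofs are below) =====
def Claim_equal_synergy_tokenize_py : Prop := ∀ (text : String), Dom_synergy_tokenize_py text → Spec_synergy_tokenize_py text (synergy_tokenize_py text)

-- ===== LEMMAS AND PROOFS =====

-- the token a buffer/run contributes (empty list if too short)
def pvFlush (b : List Char) : List String :=
  if 2 ≤ PySem.Str.len (String.ofList b) then [String.ofList b] else []

-- proof-side: the plain token LIST produced by run-grouping
def pvRuns (cs : List Char) : List String :=
  match cs with
  | [] => []
  | c :: rest =>
    if pvTokChar c then
      pvFlush (c :: rest.takeWhile pvTokChar) ++ pvRuns (rest.dropWhile pvTokChar)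
    else pvRuns rest
termination_by cs.length
decreasing_by
  · exact Nat.lt_succ_of_le (List.length_dropWhile_le _ _)
  · simp

theorem pvFlush_nil : pvFlush [] = [] := by simp [pvFlush, PySem.Str.len]

theorem pvRuns_cons_neg {c : Char} {rest : List Char} (hc : ¬ pvTokChar c = true) :
    pvRuns (c :: rest) = pvRuns rest := by
  rw [pvRuns]; simp [hc]

theorem pvRuns_split (cs : List Char) :
    pvRuns cs = pvFlush (cs.takeWhile pvTokChar) ++ pvRuns (cs.dropWhile pvTokChar) := by
  cases cs with
  | nil => simp [pvRuns, pvFlush_nil]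
  | cons c rest =>
    by_cases h : pvTokChar c = true
    · rw [pvRuns]; simp [h, List.takeWhile, List.dropWhile]
    · rw [pvRuns_cons_neg h]
      simp [List.takeWhile, List.dropWhile, h, pvFlush_nil, pvRuns_cons_neg h]

-- A's flush branch equals appending pvFlush
theorem pvStepA_flush (tokens : List String) (buf : List Char) :
    (if 2 ≤ PySem.Str.len (String.ofList buf) then tokens ++ [String.ofList buf] else tokens)
      = tokens ++ pvFlush buf := by
  unfold pvFlush; split_ifs <;> simp

-- A's fold, started with any pending (tokens, buf), finishes to
-- tokens ++ the flush of the continued first run ++ the run tokens of the rest.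
theorem pvFoldA_eq (cs : List Char) : ∀ (tokens : List String) (buf : List Char),
    (let st := cs.foldl pvStepA (tokens, buf)
     if st.2 ≠ [] then
       if 2 ≤ PySem.Str.len (String.ofList st.2) then st.1 ++ [String.ofList st.2] else st.1
     else st.1)
      = tokens ++ pvFlush (buf ++ cs.takeWhile pvTokChar) ++ pvRuns (cs.dropWhile pvTokChar) := by
  induction cs with
  | nil =>
    intro tokens buf
    by_cases h : buf = []
    · simp [h, pvFlush_nil, pvRuns]
    · simp only [List.foldl_nil, List.takeWhile_nil, List.dropWhile_nil, List.append_nil,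
        pvRuns, ne_eq, h, not_false_eq_true, if_true, List.append_nil]
      rw [pvStepA_flush]
  | cons c rest ih =>
    intro tokens buf
    by_cases hc : pvTokChar c = true
    · simp only [List.foldl_cons, pvStepA, hc, if_true, List.takeWhile, List.dropWhile]
      rw [ih tokens (buf ++ [c])]
      simp
    · simp only [List.foldl_cons, List.takeWhile, List.dropWhile, hc]
      by_cases hb : buf = []
      · subst hb
        have hstep : pvStepA (tokens, ([] : List Char)) c = (tokens, []) := by
          simp [pvStepA, hc]
        rw [hstep, ih tokens [], pvRuns_cons_neg hc, pvRuns_split rest]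
        simp [pvFlush_nil]
      · have hstep : pvStepA (tokens, buf) c = (tokens ++ pvFlush buf, []) := by
          simp only [pvStepA, hc, Bool.false_eq_true, if_false, ne_eq, hb, not_false_eq_true,
            if_true]
          rw [pvStepA_flush]
        rw [hstep, ih (tokens ++ pvFlush buf) [], pvRuns_cons_neg hc, pvRuns_split rest]
        simp

-- B's scan threads Set.add over exactly the run tokens
theorem pvScanB_eq (n : Nat) : ∀ (cs : List Char), cs.length ≤ n → ∀ (out : PySem.Set String),
    pvScanB cs out = (pvRuns cs).foldl PySem.Set.add out := by
  induction n with
  | zero =>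
    intro cs h out
    have : cs = [] := List.eq_nil_of_length_eq_zero (Nat.le_zero.mp h)
    subst this; rw [pvScanB, pvRuns]; rfl
  | succ n ih =>
    intro cs h out
    cases cs with
    | nil => rw [pvScanB, pvRuns]; rfl
    | cons c rest =>
      by_cases hc : pvTokChar c = true
      · rw [pvScanB, pvRuns]
        simp only [hc, if_true]
        rw [ih _ (le_trans (List.length_dropWhile_le _ _) (Nat.le_of_succ_le_succ h))]
        have hlen : PySem.Str.len (String.ofList (c :: rest.takeWhile pvTokChar))
            = ((c :: rest.takeWhile pvTokChar).length : Int) := by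
          simp [PySem.Str.len]
        by_cases h2 : 2 ≤ (c :: rest.takeWhile pvTokChar).length
        · have h2' : 2 ≤ PySem.Str.len (String.ofList (c :: rest.takeWhile pvTokChar)) := by
            rw [hlen]; exact_mod_cast h2
          rw [if_pos h2, pvFlush, if_pos h2']
          rfl
        · have h2' : ¬ 2 ≤ PySem.Str.len (String.ofList (c :: rest.takeWhile pvTokChar)) := by
            rw [hlen]; exact_mod_cast h2
          rw [if_neg h2, pvFlush, if_neg h2']
          rfl
      · rw [pvScanB, pvRuns_cons_neg hc]
        simp only [hc, Bool.false_eq_true, if_false]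
        exact ih _ (Nat.le_of_succ_le_succ h) out

-- ===== VERDICT (by name: the statement is the Claim_ definition above) =====
theorem synergy_tokenize_py_spec : Claim_equal_synergy_tokenize_py := by
  intro text _
  unfold Spec_synergy_tokenize_py synergy_tokenize_py synergy_tokenize_py_alt
  rw [pvScanB_eq (PySem.Str.lower text).toList.length _ le_rfl]
  simp only [pvFoldA_eq (PySem.Str.lower text).toList [] [], List.nil_append]
  rw [← pvRuns_split, PySem.Set.ofList_eq_foldl]
  rfl
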